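-- pv_equiv track=rewrite | github.com/mutjin08/hanaro-react | 13458_시험감독.py | solution
-- ===== SOURCE A (Python) =====
-- def solution(n, a, b, c):
--   a.sort()
--   answer = 0
--
--   for num in a:
--     answer+=1
--     if num <= b:
--       continue
--     answer += num//c
--     if num%c!=0:
--       answer += 1
--   return answer
-- ===== SOURCE B (Python) =====
-- def solution(n, a, b, c):
--     freq = {}
--     for num in a:
--         freq[num] = freq.get(num, 0) + 1
--     answer = 0
--     for value, f in freq.items():
--         answer += f
--         if value > b:
--             answer += f * (value // c + (1 if value % c != 0 else 0))
--     return answer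
-- ===== Notes on version B (the rewrite author's own statement) =====
-- stated objective: alternative
-- what changed: B replaces A's sort-then-scan-every-room pass with an unsorted frequency table (value -> number of rooms) and sums each distinct value's contribution once, weighted by its multiplicity; B also does not mutate `a` (A sorts it in place).
import Mathlib
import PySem

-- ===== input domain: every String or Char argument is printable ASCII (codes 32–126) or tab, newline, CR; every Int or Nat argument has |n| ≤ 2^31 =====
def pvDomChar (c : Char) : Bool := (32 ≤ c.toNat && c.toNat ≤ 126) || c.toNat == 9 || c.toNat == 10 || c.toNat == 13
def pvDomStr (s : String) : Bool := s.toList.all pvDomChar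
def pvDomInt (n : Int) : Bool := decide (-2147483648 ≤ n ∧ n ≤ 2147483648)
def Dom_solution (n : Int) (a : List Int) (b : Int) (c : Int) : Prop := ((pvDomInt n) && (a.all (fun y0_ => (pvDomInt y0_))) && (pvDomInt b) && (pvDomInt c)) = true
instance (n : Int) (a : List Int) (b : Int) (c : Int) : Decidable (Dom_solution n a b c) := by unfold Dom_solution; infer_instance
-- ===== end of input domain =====

-- B groups the rooms into a frequency table instead of sorting, adding each distinct
-- student-count's contribution once, weighted by its multiplicity (objective: alternative decomposition).
-- A sorts the list `a` in place (a side effect B does not perform); the equivalence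
-- proved here is about the return value only, which does not depend on the order.

-- ===== PORT A =====
def solution (n : Int) (a : List Int) (b : Int) (c : Int) : Int :=
  (PySem.List.sorted a (fun x => x) false).foldl
    (fun answer num =>
      let answer := answer + 1
      if num ≤ b then answer
      else
        let answer := answer + PySem.Int.floordiv num c
        if PySem.Int.mod num c ≠ 0 then answer + 1 else answer) 0

-- ===== PORT B =====
def solution_alt (n : Int) (a : List Int) (b : Int) (c : Int) : Int :=
  let freq := a.foldl (fun d num => d.insert num (d.getD num 0 + 1)) PySem.Dict.empty
  freq.items.foldl
    (fun answer p =>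
      let answer := answer + p.2
      if p.1 > b then
        answer + p.2 * (PySem.Int.floordiv p.1 c + (if PySem.Int.mod p.1 c ≠ 0 then 1 else 0))
      else answer) 0

-- ===== PRECONDITION & SPEC =====
-- Pre_ excludes exactly the inputs where Python A raises ZeroDivisionError:
-- c = 0 while some room count exceeds b (so `num // c` is reached).
def Pre_solution (n : Int) (a : List Int) (b : Int) (c : Int) : Prop :=
  c ≠ 0 ∨ ∀ x ∈ a, x ≤ b
instance (n : Int) (a : List Int) (b : Int) (c : Int) : Decidable (Pre_solution n a b c) := by
  unfold Pre_solution; infer_instance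

def pvWitness_solution : Int × List Int × Int × Int := (3, [1, 5, 5, 2], 2, 3)

def Spec_solution (n : Int) (a : List Int) (b : Int) (c : Int) (out : Int) : Prop := out = solution_alt n a b c
instance (n : Int) (a : List Int) (b : Int) (c : Int) (out : Int) : Decidable (Spec_solution n a b c out) := by unfold Spec_solution; infer_instance

-- ===== CLAIM (what is proved, stated in full; the proofs are below) =====
def Claim_equal_solution : Prop := ∀ (n : Int) (a : List Int) (b : Int) (c : Int), Dom_solution n a b c → Pre_solution n a b c → Spec_solution n a b c (solution n a b c)

-- ===== LEMMAS AND PROOFS =====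

-- per-room contribution: 1 main supervisor plus ceil-style extras when num > b
def pvF (b c num : Int) : Int :=
  1 + if num ≤ b then 0
      else PySem.Int.floordiv num c + (if PySem.Int.mod num c ≠ 0 then 1 else 0)

theorem solution_eq_sum (n : Int) (a : List Int) (b c : Int) :
    solution n a b c = (a.map (pvF b c)).sum := by
  unfold solution
  have hbody : (fun (answer num : Int) =>
      let answer := answer + 1
      if num ≤ b then answer
      else
        let answer := answer + PySem.Int.floordiv num c
        if PySem.Int.mod num c ≠ 0 then answer + 1 else answer)
      = fun (answer num : Int) => answer + pvF b c num := by
    funext s x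
    simp only [pvF]
    split_ifs <;> ring
  rw [hbody, PySem.List.foldl_add]
  have := (PySem.List.sorted_perm a (fun x => x) false).map (pvF b c)
  rw [this.sum_eq]
  ring

theorem solution_alt_eq_sum (n : Int) (a : List Int) (b c : Int) :
    solution_alt n a b c
      = ((PySem.Set.ofList a).map (fun k => ((a.count k : Int)) * pvF b c k)).sum := by
  unfold solution_alt
  rw [PySem.Dict.foldl_insert_getD_add_one_eq_counter]
  show (List.foldl _ 0 (PySem.Dict.counter a).items) = _
  rw [PySem.Dict.items_counter]
  have hbody : (fun (answer : Int) (p : Int × Int) =>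
      let answer := answer + p.2
      if p.1 > b then
        answer + p.2 * (PySem.Int.floordiv p.1 c + (if PySem.Int.mod p.1 c ≠ 0 then 1 else 0))
      else answer)
      = fun (answer : Int) (p : Int × Int) => answer + p.2 * pvF b c p.1 := by
    funext s p
    simp only [pvF]
    by_cases h : p.1 ≤ b
    · rw [if_neg (by omega), if_pos h]; ring
    · rw [if_pos (by omega), if_neg h]; ring
  rw [hbody, PySem.List.foldl_add]
  rw [List.map_map]
  simp [Function.comp_def]

theorem grouped_sum (a : List Int) (b c : Int) :
    ((PySem.Set.ofList a).map (fun k => ((a.count k : Int)) * pvF b c k)).sum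
      = (a.map (pvF b c)).sum := by
  have hnd : (PySem.Set.ofList a).Nodup := PySem.Set.nodup_ofList a
  have hfin : (PySem.Set.ofList a).toFinset = a.toFinset := by
    ext x; simp [PySem.Set.mem_ofList]
  rw [← List.sum_toFinset _ hnd, hfin, Finset.sum_list_map_count a (pvF b c)]
  apply Finset.sum_congr rfl
  intro x hx
  simp

-- ===== VERDICT (by name: the statement is the Claim_ definition above) =====
theorem solution_spec : Claim_equal_solution := by
  intro n a b c _ _
  unfold Spec_solution
  rw [solution_eq_sum, solution_alt_eq_sum, grouped_sum]
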